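-- pv_equiv track=rewrite | github.com/rebeccazyr/blocktaxo | eval.py | compute_ancestor_pairs
-- ===== SOURCE A (Python) =====
-- from typing import Dict, Iterable, List, Sequence, Tuple
--
-- def compute_ancestor_pairs(relationship_set: Iterable[Tuple[str, str]]) -> set[Tuple[str, str]]:
--     adjacency: Dict[str, List[str]] = {}
--     for parent, child in relationship_set:
--         adjacency.setdefault(parent, []).append(child)
--
--     ancestors: set[Tuple[str, str]] = set()
--     for ancestor in adjacency:
--         stack = list(adjacency.get(ancestor, []))
--         visited: set[str] = set()
--         while stack:
--             node = stack.pop()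
--             if node in visited:
--                 continue
--             visited.add(node)
--             ancestors.add((ancestor, node))
--             stack.extend(adjacency.get(node, []))
--     return ancestors
-- ===== SOURCE B (Python) =====
-- def compute_ancestor_pairs(relationship_set):
--     # Transitive closure by repeated composition with the direct-edge relation,
--     # instead of a per-source DFS.
--     succ = {}
--     for parent, child in relationship_set:
--         succ.setdefault(parent, []).append(child)
--     reach = set(relationship_set)
--     while True:
--         added = {(a, c)
--                  for (a, b) in reach
--                  for c in succ.get(b, ())
--                  if (a, c) not in reach}
--         if not added:
--             return reach
--         reach |= added
-- ===== Notes on version B (the rewrite author's own statement) =====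
-- stated objective: alternative
-- what changed: Replaces the per-source DFS with an explicit stack by a semi-naive fixpoint: seed the reach set with the direct edges and repeatedly compose it with the edge relation until no new pair appears.
import Mathlib
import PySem

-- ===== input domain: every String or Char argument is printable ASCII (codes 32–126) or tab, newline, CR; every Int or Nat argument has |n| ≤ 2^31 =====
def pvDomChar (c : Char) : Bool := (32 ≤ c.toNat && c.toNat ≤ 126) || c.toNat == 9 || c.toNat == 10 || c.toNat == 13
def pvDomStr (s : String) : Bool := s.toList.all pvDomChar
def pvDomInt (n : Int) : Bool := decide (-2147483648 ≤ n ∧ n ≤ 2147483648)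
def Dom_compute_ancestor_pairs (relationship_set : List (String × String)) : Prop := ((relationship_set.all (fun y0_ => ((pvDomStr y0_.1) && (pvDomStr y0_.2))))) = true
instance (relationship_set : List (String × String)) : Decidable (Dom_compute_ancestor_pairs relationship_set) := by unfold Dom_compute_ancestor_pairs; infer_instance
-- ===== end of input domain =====

-- B replaces A's per-source DFS by a fixpoint that repeatedly composes the reach set with the
-- direct-edge relation (objective: alternative algorithm, similar cost).
-- Both Pythons RETURN A SET (unordered; the outputs are compared as finite sets). Python's set
-- iteration order is not modelled, so both ports return the canonical lexicographically sorted
-- listing of their set (pvCanon); each port's set itself is built exactly as its Python builds it.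

-- canonical listing of a set of string pairs (lexicographic order)
def pvLexLe (p q : String × String) : Bool :=
  decide (p.1 < q.1) || (decide (p.1 = q.1) && decide (p.2 ≤ q.2))

def pvCanon (s : List (String × String)) : List (String × String) := s.mergeSort pvLexLe

-- the dict build `succ.setdefault(parent, []).append(child)` — the identical line occurs in A and B
def pvAdj (E : List (String × String)) : PySem.Dict String (List String) :=
  E.foldl (fun d pc => d.insert pc.1 (d.getD pc.1 [] ++ [pc.2])) PySem.Dict.empty

-- facts about pvAdj cited by the termination proofs of the loops below
theorem pvAdj_getD_gen (E : List (String × String)) (d : PySem.Dict String (List String)) (u : String) :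
    (E.foldl (fun d pc => d.insert pc.1 (d.getD pc.1 [] ++ [pc.2])) d).getD u []
      = d.getD u [] ++ (E.filter (fun pc => pc.1 == u)).map Prod.snd := by
  induction E generalizing d with
  | nil => simp
  | cons p E ih =>
    simp only [List.foldl_cons, ih, List.filter_cons]
    rw [PySem.Dict.getD_insert]
    by_cases h : p.1 = u
    · subst h; simp
    · simp [h, Ne.symm h, beq_iff_eq]

theorem pvAdj_getD (E : List (String × String)) (u : String) :
    (pvAdj E).getD u [] = (E.filter (fun pc => pc.1 == u)).map Prod.snd := by
  rw [pvAdj, pvAdj_getD_gen]; rfl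

theorem pvAdj_keys (E : List (String × String)) :
    (pvAdj E).keys = PySem.Set.ofList (E.map Prod.fst) := by
  rw [pvAdj, PySem.Dict.keys_foldl_insert_key E Prod.fst (fun d pc => d.getD pc.1 [] ++ [pc.2])]
  rfl

theorem pvAdj_getD_length_le (E : List (String × String)) (u : String) :
    ((pvAdj E).getD u []).length ≤ E.length := by
  rw [pvAdj_getD]
  simpa using List.length_filter_le _ _

theorem pvAdj_getD_eq_nil_of_not_key (E : List (String × String)) (u : String)
    (h : u ∉ (pvAdj E).keys) : (pvAdj E).getD u [] = [] := by
  rw [pvAdj_keys] at h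
  rw [pvAdj_getD]
  simp only [PySem.Set.mem_ofList, List.mem_map] at h
  push Not at h
  rw [List.filter_eq_nil_iff.mpr]
  · rfl
  · intro pc hpc
    simp only [beq_iff_eq]
    exact fun he => (h pc hpc) he

theorem pv_filter_length_lt {α : Type} (l : List α) (p q : α → Bool)
    (h : ∀ x, q x = true → p x = true) (a : α) (ha : a ∈ l) (hpa : p a = true) (hqa : q a = false) :
    (l.filter q).length < (l.filter p).length := by
  induction l with
  | nil => simp at ha
  | cons x l ih =>
    rcases List.mem_cons.mp ha with rfl | hx
    · simp only [List.filter_cons, hpa, hqa]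
      have : (l.filter q).length ≤ (l.filter p).length := by
        simp only [← List.countP_eq_length_filter]
        exact List.countP_mono_left (fun a _ => h a)
      simp; omega
    · have := ih hx
      by_cases hq : q x
      · simp only [List.filter_cons, hq, h x hq]; simpa
      · simp only [List.filter_cons, Bool.not_eq_true] at *
        rw [if_neg (by simp [hq])]
        by_cases hp : p x <;> simp [hp] <;> omega

theorem pv_mem_pvAdj_getD (E : List (String × String)) (u v : String) :
    v ∈ (pvAdj E).getD u [] ↔ (u, v) ∈ E := by
  rw [pvAdj_getD]
  simp only [List.mem_map, List.mem_filter, beq_iff_eq]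
  constructor
  · rintro ⟨pc, ⟨hm, h1⟩, h2⟩
    have : pc = (u, v) := Prod.ext h1 h2
    rwa [this] at hm
  · intro hm; exact ⟨(u, v), ⟨hm, rfl⟩, rfl⟩

theorem pv_contains_false_iff {α : Type} [BEq α] [LawfulBEq α] (s : PySem.Set α) (x : α) :
    PySem.Set.contains s x = false ↔ x ∉ s := by
  rw [← Bool.not_eq_true, PySem.Set.contains_iff]

-- ===== PORT A =====
-- the `while stack:` DFS loop of A (stack.pop() pops the LAST element; extend appends)
def pvDfsA (E : List (String × String)) (stack : List String) (visited : PySem.Set String) :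
    PySem.Set String :=
  if h : stack = [] then visited
  else if PySem.Set.contains visited (stack.getLast h) then
    pvDfsA E stack.dropLast visited
  else
    pvDfsA E (stack.dropLast ++ (pvAdj E).getD (stack.getLast h) [])
      (PySem.Set.add visited (stack.getLast h))
termination_by
  ((pvAdj E).keys.filter (fun k => !(PySem.Set.contains visited k))).length * (E.length + 1)
    + stack.length
decreasing_by
  · have h1 : stack.dropLast.length = stack.length - 1 := List.length_dropLast
    have h2 : stack.length ≠ 0 := fun hc => h (List.eq_nil_of_length_eq_zero hc)
    omega
  · rename_i hnv
    rw [Bool.not_eq_true, pv_contains_false_iff] at hnv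
    have h1 : stack.dropLast.length = stack.length - 1 := List.length_dropLast
    have h2 : stack.length ≠ 0 := fun hc => h (List.eq_nil_of_length_eq_zero hc)
    have hch : ((pvAdj E).getD (stack.getLast h) []).length ≤ E.length :=
      pvAdj_getD_length_le E _
    by_cases hk : stack.getLast h ∈ (pvAdj E).keys
    · have hlt :
          ((pvAdj E).keys.filter
            (fun k => !(PySem.Set.contains (PySem.Set.add visited (stack.getLast h)) k))).length
          < ((pvAdj E).keys.filter (fun k => !(PySem.Set.contains visited k))).length := by
        refine pv_filter_length_lt _ _ _ ?_ (stack.getLast h) hk ?_ ?_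
        · intro x hx
          simp only [Bool.not_eq_eq_eq_not, Bool.not_true, pv_contains_false_iff] at hx ⊢
          intro hm
          exact hx ((PySem.Set.mem_add visited (stack.getLast h) x).mpr (Or.inl hm))
        · simp only [Bool.not_eq_eq_eq_not, Bool.not_true, pv_contains_false_iff]
          exact hnv
        · have hm : stack.getLast h ∈ PySem.Set.add visited (stack.getLast h) :=
            (PySem.Set.mem_add visited (stack.getLast h) _).mpr (Or.inr rfl)
          simp [hm]
      have hmul :
          ((pvAdj E).keys.filter
            (fun k => !(PySem.Set.contains (PySem.Set.add visited (stack.getLast h)) k))).length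
              * (E.length + 1) + (E.length + 1)
          ≤ ((pvAdj E).keys.filter (fun k => !(PySem.Set.contains visited k))).length
              * (E.length + 1) := by
        have := Nat.succ_le_of_lt hlt
        calc _ = (((pvAdj E).keys.filter
              (fun k => !(PySem.Set.contains (PySem.Set.add visited (stack.getLast h)) k))).length
                + 1) * (E.length + 1) := by ring
        _ ≤ _ := Nat.mul_le_mul_right _ this
      simp only [List.length_append]
      omega
    · have hnil : (pvAdj E).getD (stack.getLast h) [] = [] :=
        pvAdj_getD_eq_nil_of_not_key E _ hk
      have hle :
          ((pvAdj E).keys.filter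
            (fun k => !(PySem.Set.contains (PySem.Set.add visited (stack.getLast h)) k))).length
          ≤ ((pvAdj E).keys.filter (fun k => !(PySem.Set.contains visited k))).length := by
        simp only [← List.countP_eq_length_filter]
        refine List.countP_mono_left (fun x _ hx => ?_)
        simp only [Bool.not_eq_eq_eq_not, Bool.not_true, pv_contains_false_iff] at hx ⊢
        intro hm
        exact hx ((PySem.Set.mem_add visited (stack.getLast h) x).mpr (Or.inl hm))
      have hmul :
          ((pvAdj E).keys.filter
            (fun k => !(PySem.Set.contains (PySem.Set.add visited (stack.getLast h)) k))).length
              * (E.length + 1)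
          ≤ ((pvAdj E).keys.filter (fun k => !(PySem.Set.contains visited k))).length
              * (E.length + 1) := Nat.mul_le_mul_right _ hle
      rw [hnil]
      have h3 : (stack.dropLast ++ ([] : List String)).length = stack.length - 1 := by
        simp [h1]
      omega

-- per-ancestor DFS results, accumulated into the `ancestors` set in visit order
def pvRawA (E : List (String × String)) : List (String × String) :=
  (pvAdj E).keys.foldl
    (fun acc anc =>
      PySem.Set.update acc
        ((pvDfsA E ((pvAdj E).getD anc []) PySem.Set.empty).map (fun n => (anc, n))))
    PySem.Set.empty

def compute_ancestor_pairs (relationship_set : List (String × String)) : List (String × String) :=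
  pvCanon (pvRawA relationship_set)

-- ===== PORT B =====
def pvNodes (E : List (String × String)) : PySem.Set String :=
  PySem.Set.ofList (E.map Prod.fst ++ E.map Prod.snd)

-- the set comprehension `{(a, c) for (a, b) in reach for c in succ.get(b, ()) if (a, c) not in reach}`
def pvStep (E : List (String × String)) (reach : List (String × String)) :
    List (String × String) :=
  PySem.Set.ofList (reach.flatMap (fun p =>
    (((pvAdj E).getD p.2 []).filter (fun c => !(PySem.Set.contains reach (p.1, c)))).map
      (fun c => (p.1, c))))

def pvUBound (E : List (String × String)) : Nat :=
  ((pvNodes E).flatMap (fun a => (pvNodes E).map (fun b => (a, b)))).length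

-- facts cited by pvLoopB's invariant arguments and termination proof
theorem pv_mem_pvStep (E : List (String × String)) (reach : List (String × String))
    (x : String × String) :
    x ∈ pvStep E reach ↔
      (∃ p ∈ reach, x.1 = p.1 ∧ x.2 ∈ (pvAdj E).getD p.2 []) ∧ x ∉ reach := by
  obtain ⟨x1, x2⟩ := x
  simp only [pvStep, PySem.Set.mem_ofList, List.mem_flatMap, List.mem_map, List.mem_filter,
    Bool.not_eq_eq_eq_not, Bool.not_true, pv_contains_false_iff]
  constructor
  · rintro ⟨p, hp, c, ⟨hc, hnc⟩, heq⟩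
    obtain ⟨rfl, rfl⟩ := Prod.mk.inj heq
    exact ⟨⟨p, hp, rfl, hc⟩, hnc⟩
  · rintro ⟨⟨p, hp, h1, h2⟩, hnm⟩
    subst h1
    exact ⟨p, hp, x2, ⟨h2, hnm⟩, rfl⟩

theorem pv_nodup_length_le (l m : List (String × String)) (h1 : l.Nodup) (h : ∀ x ∈ l, x ∈ m) :
    l.length ≤ m.length :=
  calc l.length = l.toFinset.card := (List.toFinset_card_of_nodup h1).symm
  _ ≤ m.toFinset.card := Finset.card_le_card (by
      intro x hx; simp only [List.mem_toFinset] at *; exact h x hx)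
  _ ≤ m.length := m.toFinset_card_le

theorem pv_fst_mem_pvNodes (E : List (String × String)) {a b : String} (h : (a, b) ∈ E) :
    a ∈ pvNodes E := by
  simp only [pvNodes, PySem.Set.mem_ofList, List.mem_append, List.mem_map]
  exact Or.inl ⟨(a, b), h, rfl⟩

theorem pv_snd_mem_pvNodes (E : List (String × String)) {a b : String} (h : (a, b) ∈ E) :
    b ∈ pvNodes E := by
  simp only [pvNodes, PySem.Set.mem_ofList, List.mem_append, List.mem_map]
  exact Or.inr ⟨(a, b), h, rfl⟩

theorem pv_length_le_ubound (E : List (String × String)) (reach : List (String × String))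
    (hn : reach.Nodup) (hs : ∀ p ∈ reach, p.1 ∈ pvNodes E ∧ p.2 ∈ pvNodes E) :
    reach.length ≤ pvUBound E := by
  refine pv_nodup_length_le _ _ hn (fun x hx => ?_)
  obtain ⟨h1, h2⟩ := hs x hx
  simp only [List.mem_flatMap, List.mem_map]
  exact ⟨x.1, h1, x.2, h2, rfl⟩

theorem pv_union_step_sub (E : List (String × String)) (reach : List (String × String))
    (hs : ∀ p ∈ reach, p.1 ∈ pvNodes E ∧ p.2 ∈ pvNodes E) :
    ∀ p ∈ PySem.Set.union reach (pvStep E reach), p.1 ∈ pvNodes E ∧ p.2 ∈ pvNodes E := by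
  intro p hp
  rcases (PySem.Set.mem_union _ _ p).mp hp with hp | hp
  · exact hs p hp
  · obtain ⟨⟨q, hq, h1, h2⟩, _⟩ := (pv_mem_pvStep E reach p).mp hp
    have he : (q.2, p.2) ∈ E := (pv_mem_pvAdj_getD E q.2 p.2).mp h2
    exact ⟨h1 ▸ (hs q hq).1, pv_snd_mem_pvNodes E he⟩

theorem pv_length_lt_union (s t : List (String × String)) (hs : s.Nodup) {x : String × String}
    (hx : x ∈ t) (hxs : x ∉ s) : s.length < (PySem.Set.union s t).length := by
  have hsub : ∀ y ∈ x :: s, y ∈ PySem.Set.union s t := by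
    intro y hy
    rcases List.mem_cons.mp hy with rfl | hy
    · exact (PySem.Set.mem_union s t y).mpr (Or.inr hx)
    · exact (PySem.Set.mem_union s t y).mpr (Or.inl hy)
  have : (x :: s).length ≤ (PySem.Set.union s t).length :=
    pv_nodup_length_le _ _ (List.nodup_cons.mpr ⟨hxs, hs⟩) hsub
  simpa using this

-- the `while True:` fixpoint loop of B (the proof arguments only make the loop total)
def pvLoopB (E : List (String × String)) (reach : List (String × String)) (hn : reach.Nodup)
    (hs : ∀ p ∈ reach, p.1 ∈ pvNodes E ∧ p.2 ∈ pvNodes E) : List (String × String) :=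
  if hA : pvStep E reach = [] then reach
  else
    pvLoopB E (PySem.Set.union reach (pvStep E reach))
      (PySem.Set.nodup_union _ _ hn)
      (pv_union_step_sub E reach hs)
termination_by pvUBound E + 1 - reach.length
decreasing_by
  obtain ⟨x, hx⟩ := List.exists_mem_of_ne_nil _ hA
  have hxn : x ∉ reach := ((pv_mem_pvStep E reach x).mp hx).2
  have hlt : reach.length < (PySem.Set.union reach (pvStep E reach)).length :=
    pv_length_lt_union reach _ hn hx hxn
  have hub : (PySem.Set.union reach (pvStep E reach)).length ≤ pvUBound E :=
    pv_length_le_ubound E _ (PySem.Set.nodup_union _ _ hn) (pv_union_step_sub E reach hs)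
  omega

theorem pv_seed_sub (E : List (String × String)) :
    ∀ p ∈ PySem.Set.ofList E, p.1 ∈ pvNodes E ∧ p.2 ∈ pvNodes E := by
  rintro ⟨p1, p2⟩ hp
  have hp : (p1, p2) ∈ E := (PySem.Set.mem_ofList E _).mp hp
  exact ⟨pv_fst_mem_pvNodes E hp, pv_snd_mem_pvNodes E hp⟩

def pvRawB (E : List (String × String)) : List (String × String) :=
  pvLoopB E (PySem.Set.ofList E) (PySem.Set.nodup_ofList E) (pv_seed_sub E)

def compute_ancestor_pairs_alt (relationship_set : List (String × String)) :
    List (String × String) :=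
  pvCanon (pvRawB relationship_set)

-- ===== PRECONDITION & SPEC =====
def Spec_compute_ancestor_pairs (relationship_set : List (String × String)) (out : List (String × String)) : Prop := out = compute_ancestor_pairs_alt relationship_set
instance (relationship_set : List (String × String)) (out : List (String × String)) : Decidable (Spec_compute_ancestor_pairs relationship_set out) := by unfold Spec_compute_ancestor_pairs; infer_instance

-- ===== CLAIM (what is proved, stated in full; the proofs are below) =====
def Claim_equal_compute_ancestor_pairs : Prop := ∀ (relationship_set : List (String × String)), Dom_compute_ancestor_pairs relationship_set → Spec_compute_ancestor_pairs relationship_set (compute_ancestor_pairs relationship_set)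

-- ===== LEMMAS AND PROOFS =====

-- the edge relation of the input; both outputs are its transitive closure
def pvEdge (E : List (String × String)) (a b : String) : Prop := (a, b) ∈ E

theorem pvDfsA_sound (E : List (String × String)) (stack : List String)
    (visited : PySem.Set String) :
    ∀ x ∈ pvDfsA E stack visited,
      x ∈ visited ∨ ∃ s ∈ stack, Relation.ReflTransGen (pvEdge E) s x := by
  induction stack, visited using pvDfsA.induct E with
  | case1 visited =>
    intro x hx
    rw [pvDfsA, dif_pos rfl] at hx
    exact Or.inl hx
  | case2 stack visited h hv ih =>
    intro x hx
    rw [pvDfsA, dif_neg h, if_pos hv] at hx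
    rcases ih x hx with hx | ⟨s, hs, hr⟩
    · exact Or.inl hx
    · exact Or.inr ⟨s, List.mem_of_mem_dropLast hs, hr⟩
  | case3 stack visited h hv ih =>
    intro x hx
    rw [pvDfsA, dif_neg h, if_neg hv] at hx
    rcases ih x hx with hx | ⟨s, hs, hr⟩
    · rcases (PySem.Set.mem_add visited (stack.getLast h) x).mp hx with hx | rfl
      · exact Or.inl hx
      · exact Or.inr ⟨stack.getLast h, List.getLast_mem h, Relation.ReflTransGen.refl⟩
    · rcases List.mem_append.mp hs with hs | hs
      · exact Or.inr ⟨s, List.mem_of_mem_dropLast hs, hr⟩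
      · have he : pvEdge E (stack.getLast h) s := (pv_mem_pvAdj_getD E _ s).mp hs
        exact Or.inr ⟨stack.getLast h, List.getLast_mem h, Relation.ReflTransGen.head he hr⟩

def pvInv (E : List (String × String)) (stack : List String) (visited : PySem.Set String) : Prop :=
  ∀ v ∈ visited, ∀ c, pvEdge E v c → c ∈ visited ∨ c ∈ stack

theorem pvDfsA_complete (E : List (String × String)) (stack : List String)
    (visited : PySem.Set String) (hinv : pvInv E stack visited) :
    ∀ y x, (y ∈ visited ∨ y ∈ stack) → Relation.ReflTransGen (pvEdge E) y x →
      x ∈ pvDfsA E stack visited := by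
  revert hinv
  induction stack, visited using pvDfsA.induct E with
  | case1 visited =>
    intro hinv y x hy hr
    rw [pvDfsA, dif_pos rfl]
    have hy : y ∈ visited := hy.resolve_right (by simp)
    have key : ∀ a, Relation.ReflTransGen (pvEdge E) a x → a ∈ visited → x ∈ visited := by
      intro a hr
      induction hr using Relation.ReflTransGen.head_induction_on with
      | refl => exact id
      | head h' _ ih =>
        intro ha
        rename_i a' c' _
        exact ih ((hinv a' ha c' h').resolve_right (by simp))
    exact key y hr hy
  | case2 stack visited h hv ih =>
    intro hinv y x hy hr
    rw [pvDfsA, dif_neg h, if_pos hv]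
    have hnode : stack.getLast h ∈ visited := (PySem.Set.contains_iff visited _).mp hv
    have hmem : ∀ c, c ∈ stack → c ∈ stack.dropLast ∨ c = stack.getLast h := by
      intro c hc
      rw [← List.dropLast_append_getLast h] at hc
      rcases List.mem_append.mp hc with hc | hc
      · exact Or.inl hc
      · exact Or.inr (List.mem_singleton.mp hc)
    refine ih ?_ y x ?_ hr
    · intro v hvv c hc
      rcases hinv v hvv c hc with hc' | hc'
      · exact Or.inl hc'
      · rcases hmem c hc' with hc' | rfl
        · exact Or.inr hc'
        · exact Or.inl hnode
    · rcases hy with hy | hy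
      · exact Or.inl hy
      · rcases hmem y hy with hy | rfl
        · exact Or.inr hy
        · exact Or.inl hnode
  | case3 stack visited h hv ih =>
    intro hinv y x hy hr
    rw [pvDfsA, dif_neg h, if_neg hv]
    have hmem : ∀ c, c ∈ stack → c ∈ stack.dropLast ∨ c = stack.getLast h := by
      intro c hc
      rw [← List.dropLast_append_getLast h] at hc
      rcases List.mem_append.mp hc with hc | hc
      · exact Or.inl hc
      · exact Or.inr (List.mem_singleton.mp hc)
    refine ih ?_ y x ?_ hr
    · intro v hvv c hc
      rcases (PySem.Set.mem_add visited (stack.getLast h) v).mp hvv with hvv | rfl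
      · rcases hinv v hvv c hc with hc' | hc'
        · exact Or.inl ((PySem.Set.mem_add _ _ _).mpr (Or.inl hc'))
        · rcases hmem c hc' with hc' | rfl
          · exact Or.inr (List.mem_append.mpr (Or.inl hc'))
          · exact Or.inl ((PySem.Set.mem_add _ _ _).mpr (Or.inr rfl))
      · exact Or.inr (List.mem_append.mpr (Or.inr ((pv_mem_pvAdj_getD E _ c).mpr hc)))
    · rcases hy with hy | hy
      · exact Or.inl ((PySem.Set.mem_add _ _ _).mpr (Or.inl hy))
      · rcases hmem y hy with hy | rfl
        · exact Or.inr (List.mem_append.mpr (Or.inl hy))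
        · exact Or.inl ((PySem.Set.mem_add _ _ _).mpr (Or.inr rfl))

theorem pvDfsA_start (E : List (String × String)) (a x : String) :
    x ∈ pvDfsA E ((pvAdj E).getD a []) PySem.Set.empty ↔
      Relation.TransGen (pvEdge E) a x := by
  constructor
  · intro hx
    rcases pvDfsA_sound E _ _ x hx with hx | ⟨s, hs, hr⟩
    · simp [PySem.Set.empty] at hx
    · exact Relation.TransGen.head'_iff.mpr ⟨s, (pv_mem_pvAdj_getD E a s).mp hs, hr⟩
  · intro hx
    obtain ⟨c, he, hr⟩ := Relation.TransGen.head'_iff.mp hx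
    refine pvDfsA_complete E _ _ ?_ c x (Or.inr ((pv_mem_pvAdj_getD E a c).mpr he)) hr
    intro v hv
    simp [PySem.Set.empty] at hv

theorem pv_mem_foldl_update (l : List String) (g : String → List (String × String))
    (init : PySem.Set (String × String)) (x : String × String) :
    x ∈ l.foldl (fun acc a => PySem.Set.update acc (g a)) init ↔
      x ∈ init ∨ ∃ a ∈ l, x ∈ g a := by
  induction l generalizing init with
  | nil => simp
  | cons a l ih =>
    simp only [List.foldl_cons, ih, PySem.Set.mem_update, List.mem_cons]
    constructor
    · rintro (( hx | hx) | ⟨b, hb, hx⟩)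
      · exact Or.inl hx
      · exact Or.inr ⟨a, Or.inl rfl, hx⟩
      · exact Or.inr ⟨b, Or.inr hb, hx⟩
    · rintro (hx | ⟨b, (rfl | hb), hx⟩)
      · exact Or.inl (Or.inl hx)
      · exact Or.inl (Or.inr hx)
      · exact Or.inr ⟨b, hb, hx⟩

theorem pv_nodup_foldl_update (l : List String) (g : String → List (String × String))
    (init : PySem.Set (String × String)) (hn : init.Nodup) :
    (l.foldl (fun acc a => PySem.Set.update acc (g a)) init).Nodup := by
  induction l generalizing init with
  | nil => exact hn
  | cons a l ih => exact ih _ (PySem.Set.nodup_update init (g a) hn)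

theorem pvRawA_mem (E : List (String × String)) (p : String × String) :
    p ∈ pvRawA E ↔ Relation.TransGen (pvEdge E) p.1 p.2 := by
  rw [pvRawA, pv_mem_foldl_update]
  simp only [PySem.Set.empty, List.not_mem_nil, false_or, List.mem_map]
  constructor
  · rintro ⟨a, ha, n, hn, rfl⟩
    exact (pvDfsA_start E a n).mp hn
  · intro hp
    refine ⟨p.1, ?_, p.2, (pvDfsA_start E p.1 p.2).mpr hp, rfl⟩
    obtain ⟨c, he, _⟩ := Relation.TransGen.head'_iff.mp hp
    rw [pvAdj_keys]
    simp only [PySem.Set.mem_ofList, List.mem_map]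
    exact ⟨(p.1, c), he, rfl⟩

theorem pvRawA_nodup (E : List (String × String)) : (pvRawA E).Nodup :=
  pv_nodup_foldl_update _ _ _ (by simp [PySem.Set.empty])

theorem pvLoopB_supset (E : List (String × String)) (reach : List (String × String))
    (hn : reach.Nodup) (hs : ∀ p ∈ reach, p.1 ∈ pvNodes E ∧ p.2 ∈ pvNodes E) :
    ∀ p ∈ reach, p ∈ pvLoopB E reach hn hs := by
  induction reach, hn, hs using pvLoopB.induct E with
  | case1 reach hn hs hA => intro p hp; rw [pvLoopB, dif_pos hA]; exact hp
  | case2 reach hn hs hA ih =>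
    intro p hp
    rw [pvLoopB, dif_neg hA]
    exact ih p ((PySem.Set.mem_union _ _ p).mpr (Or.inl hp))

theorem pvLoopB_sound (E : List (String × String)) (reach : List (String × String))
    (hn : reach.Nodup) (hs : ∀ p ∈ reach, p.1 ∈ pvNodes E ∧ p.2 ∈ pvNodes E)
    (hr : ∀ p ∈ reach, Relation.TransGen (pvEdge E) p.1 p.2) :
    ∀ p ∈ pvLoopB E reach hn hs, Relation.TransGen (pvEdge E) p.1 p.2 := by
  revert hr
  induction reach, hn, hs using pvLoopB.induct E with
  | case1 reach hn hs hA => intro hr p hp; rw [pvLoopB, dif_pos hA] at hp; exact hr p hp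
  | case2 reach hn hs hA ih =>
    intro hr p hp
    rw [pvLoopB, dif_neg hA] at hp
    refine ih ?_ p hp
    intro q hq
    rcases (PySem.Set.mem_union _ _ q).mp hq with hq | hq
    · exact hr q hq
    · obtain ⟨⟨w, hw, h1, h2⟩, _⟩ := (pv_mem_pvStep E reach q).mp hq
      have he : pvEdge E w.2 q.2 := (pv_mem_pvAdj_getD E w.2 q.2).mp h2
      rw [h1]
      exact Relation.TransGen.tail (hr w hw) he

theorem pvLoopB_closed (E : List (String × String)) (reach : List (String × String))
    (hn : reach.Nodup) (hs : ∀ p ∈ reach, p.1 ∈ pvNodes E ∧ p.2 ∈ pvNodes E) :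
    ∀ p ∈ pvLoopB E reach hn hs, ∀ c, (p.2, c) ∈ E → (p.1, c) ∈ pvLoopB E reach hn hs := by
  induction reach, hn, hs using pvLoopB.induct E with
  | case1 reach hn hs hA =>
    intro p hp c hc
    rw [pvLoopB, dif_pos hA] at hp ⊢
    by_contra hnm
    have : (p.1, c) ∈ pvStep E reach := by
      refine (pv_mem_pvStep E reach (p.1, c)).mpr ⟨⟨p, hp, rfl, ?_⟩, hnm⟩
      exact (pv_mem_pvAdj_getD E p.2 c).mpr hc
    rw [hA] at this
    simp at this
  | case2 reach hn hs hA ih =>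
    intro p hp c hc
    rw [pvLoopB, dif_neg hA] at hp ⊢
    exact ih p hp c hc

theorem pvLoopB_nodup (E : List (String × String)) (reach : List (String × String))
    (hn : reach.Nodup) (hs : ∀ p ∈ reach, p.1 ∈ pvNodes E ∧ p.2 ∈ pvNodes E) :
    (pvLoopB E reach hn hs).Nodup := by
  induction reach, hn, hs using pvLoopB.induct E with
  | case1 reach hn hs hA => rw [pvLoopB, dif_pos hA]; exact hn
  | case2 reach hn hs hA ih => rw [pvLoopB, dif_neg hA]; exact ih

theorem pvRawB_mem (E : List (String × String)) (p : String × String) :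
    p ∈ pvRawB E ↔ Relation.TransGen (pvEdge E) p.1 p.2 := by
  constructor
  · refine pvLoopB_sound E _ _ _ ?_ p
    intro q hq
    have hq : q ∈ E := (PySem.Set.mem_ofList E q).mp hq
    exact Relation.TransGen.single (show pvEdge E q.1 q.2 by simpa [pvEdge] using hq)
  · obtain ⟨p1, p2⟩ := p
    intro h
    have key : ∀ a b : String, Relation.TransGen (pvEdge E) a b → (a, b) ∈ pvRawB E := by
      intro a b hab
      induction hab with
      | single h' =>
        exact pvLoopB_supset E _ _ _ _ ((PySem.Set.mem_ofList E _).mpr h')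
      | tail hab he ih =>
        exact pvLoopB_closed E _ _ _ _ ih _ he
    exact key p1 p2 h

theorem pvRawB_nodup (E : List (String × String)) : (pvRawB E).Nodup :=
  pvLoopB_nodup E _ _ _

theorem pvLexLe_eq_true (p q : String × String) :
    pvLexLe p q = true ↔ p.1 < q.1 ∨ (p.1 = q.1 ∧ p.2 ≤ q.2) := by
  simp [pvLexLe]

theorem pvLexLe_trans (a b c : String × String) (h1 : pvLexLe a b = true)
    (h2 : pvLexLe b c = true) : pvLexLe a c = true := by
  rw [pvLexLe_eq_true] at *
  rcases h1 with h1 | ⟨h1, h1'⟩ <;> rcases h2 with h2 | ⟨h2, h2'⟩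
  · exact Or.inl (lt_trans h1 h2)
  · exact Or.inl (h2 ▸ h1)
  · exact Or.inl (h1 ▸ h2)
  · exact Or.inr ⟨h1.trans h2, le_trans h1' h2'⟩

theorem pvLexLe_total (a b : String × String) : (pvLexLe a b || pvLexLe b a) = true := by
  rw [Bool.or_eq_true, pvLexLe_eq_true, pvLexLe_eq_true]
  rcases lt_trichotomy a.1 b.1 with h | h | h
  · exact Or.inl (Or.inl h)
  · rcases le_total a.2 b.2 with h' | h'
    · exact Or.inl (Or.inr ⟨h, h'⟩)
    · exact Or.inr (Or.inr ⟨h.symm, h'⟩)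
  · exact Or.inr (Or.inl h)

theorem pvLexLe_antisymm (a b : String × String) (h1 : pvLexLe a b = true)
    (h2 : pvLexLe b a = true) : a = b := by
  rw [pvLexLe_eq_true] at *
  rcases h1 with h1 | ⟨h1, h1'⟩ <;> rcases h2 with h2 | ⟨h2, h2'⟩
  · exact absurd h2 (lt_asymm h1)
  · exact absurd (h2 ▸ h1) (lt_irrefl _)
  · exact absurd (h1 ▸ h2) (lt_irrefl _)
  · exact Prod.ext h1 (le_antisymm h1' h2')

theorem pvCanon_eq_of_perm (s t : List (String × String)) (h : s.Perm t) :
    pvCanon s = pvCanon t := by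
  refine List.Perm.eq_of_pairwise (le := fun a b => pvLexLe a b = true)
    (fun a b _ _ hab hba => pvLexLe_antisymm a b hab hba)
    (List.pairwise_mergeSort pvLexLe_trans pvLexLe_total s)
    (List.pairwise_mergeSort pvLexLe_trans pvLexLe_total t)
    ?_
  exact ((s.mergeSort_perm pvLexLe).trans h).trans (t.mergeSort_perm pvLexLe).symm

-- ===== VERDICT (by name: the statement is the Claim_ definition above) =====
theorem compute_ancestor_pairs_spec : Claim_equal_compute_ancestor_pairs := by
  intro E _
  unfold Spec_compute_ancestor_pairs compute_ancestor_pairs compute_ancestor_pairs_alt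
  exact pvCanon_eq_of_perm _ _ ((List.perm_ext_iff_of_nodup (pvRawA_nodup E) (pvRawB_nodup E)).mpr
    (fun p => (pvRawA_mem E p).trans (pvRawB_mem E p).symm))
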